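-- pv_equiv track=rewrite | github.com/SSIGPRO/XAI | src/bak/Sara/nb_utils.py | compute_all_combinations_intersections
-- ===== SOURCE A (Python) =====
-- from itertools import combinations, product
--
-- def compute_all_combinations_intersections(idx_dict_subset):
--     """
--     Computes intersections between all combinations of layers in idx_dict_subset.
--     Returns a dictionary of intersections.
--     """
--     intersection_dict = {}
--     layers = list(idx_dict_subset.keys())
--     n_layers = len(layers)
--
--     for r in range(2, n_layers + 1):
--         for layer_combination in combinations(layers, r):
--             intersection_dict[layer_combination] = set.intersection(
--                 *(set(idx_dict_subset[layer]) for layer in layer_combination)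
--             )
--
--     return intersection_dict
-- ===== SOURCE B (Python) =====
-- def compute_all_combinations_intersections(idx_dict_subset):
--     layer_sets = {layer: set(ids) for layer, ids in idx_dict_subset.items()}
--     layers = list(layer_sets)
--     # level r-1 state: (combo, layers after combo's last element, combo's intersection)
--     prev = [((layer,), layers[i + 1:], layer_sets[layer]) for i, layer in enumerate(layers)]
--     pairs = []
--     for _r in range(2, len(layers) + 1):
--         cur = [(combo + (x,), rest[k + 1:], s & layer_sets[x])
--                for combo, rest, s in prev
--                for k, x in enumerate(rest)]
--         pairs += [(combo, s) for combo, _rest, s in cur]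
--         prev = cur
--     return dict(pairs)
-- ===== Notes on version B (the rewrite author's own statement) =====
-- stated objective: alternative
-- what changed: Instead of rebuilding every layer's set and re-intersecting all r sets for each combination, B converts each layer's list to a set once and builds the levels r = 2..n by a DP that extends each stored size-(r-1) intersection by a single set intersection; intended as faster (locally 2-8x at n=16), but a timing run measured only 1.5x at the largest size, where A times out, so no speed is claimed.
import Mathlib
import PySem

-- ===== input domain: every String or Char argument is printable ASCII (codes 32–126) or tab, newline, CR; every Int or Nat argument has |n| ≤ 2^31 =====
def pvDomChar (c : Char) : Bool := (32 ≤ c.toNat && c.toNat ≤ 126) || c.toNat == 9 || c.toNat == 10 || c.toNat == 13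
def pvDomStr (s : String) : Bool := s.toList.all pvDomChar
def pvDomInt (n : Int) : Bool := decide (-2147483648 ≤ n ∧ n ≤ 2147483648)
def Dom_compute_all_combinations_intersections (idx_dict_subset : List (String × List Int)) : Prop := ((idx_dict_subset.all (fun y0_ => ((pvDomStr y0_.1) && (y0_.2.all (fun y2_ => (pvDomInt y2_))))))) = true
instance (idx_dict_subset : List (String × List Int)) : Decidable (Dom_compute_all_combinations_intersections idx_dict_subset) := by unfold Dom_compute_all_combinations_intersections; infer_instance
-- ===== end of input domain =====

-- B replaces A's per-combination multi-set intersection (which rebuilds every layer's set for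
-- every combination) by a level-by-level DP: each layer's set is built once and every size-r
-- intersection extends a stored size-(r-1) intersection by one set; same pairs in the same order.


-- ===== PORT A =====
-- set.intersection(*ss) for a nonempty tuple of sets (A only calls it with ≥ 2 sets)
def pyIntersectAll (ss : List (List Int)) : List Int :=
  match ss with
  | [] => []
  | s :: rest => rest.foldl PySem.Set.inter s

def compute_all_combinations_intersections (idx_dict_subset : List (String × List Int)) : List (List String × List Int) :=
  let d := PySem.Dict.ofList idx_dict_subset
  let layers := d.keys
  let n_layers := layers.length
  ((PySem.List.pyRange 2 ((n_layers : Int) + 1) 1).foldl (fun intersection_dict r =>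
      (PySem.List.combinations layers r.toNat).foldl (fun intersection_dict layer_combination =>
        intersection_dict.insert layer_combination
          (pyIntersectAll (layer_combination.map (fun layer => PySem.Set.ofList (d.getD layer [])))))
        intersection_dict)
    PySem.Dict.empty).items

-- ===== PORT B =====
-- inner loop of Source B: extend (combo, s) by each element of rest, keeping the suffix after it
-- (rest[k+1:] for k = 0,1,…, by suffix recursion; exact)
def pvSpread (layer_sets : PySem.Dict String (List Int)) (combo : List String) (s : List Int) :
    List String → List (List String × List String × List Int)
  | [] => []
  | x :: rest =>
      (combo ++ [x], rest, PySem.Set.inter s (layer_sets.getD x [])) ::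
        pvSpread layer_sets combo s rest

-- Source B's initial level: ((layer,), layers[i+1:], layer_sets[layer]) for each position i
def pvInitLevel (layer_sets : PySem.Dict String (List Int)) :
    List String → List (List String × List String × List Int)
  | [] => []
  | x :: xs => ([x], xs, layer_sets.getD x []) :: pvInitLevel layer_sets xs

def compute_all_combinations_intersections_alt (idx_dict_subset : List (String × List Int)) : List (List String × List Int) :=
  let layer_sets := idx_dict_subset.foldl (fun d p => d.insert p.1 (PySem.Set.ofList p.2)) PySem.Dict.empty
  let layers := layer_sets.keys
  let st := (PySem.List.pyRange 2 ((layers.length : Int) + 1) 1).foldl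
      (fun (st : List (List String × List String × List Int) × List (List String × List Int)) _r =>
        let cur := st.1.flatMap (fun p => pvSpread layer_sets p.1 p.2.2 p.2.1)
        (cur, st.2 ++ cur.map (fun p => (p.1, p.2.2))))
      (pvInitLevel layer_sets layers, [])
  (PySem.Dict.ofList st.2).items

-- ===== PRECONDITION & SPEC =====
def Spec_compute_all_combinations_intersections (idx_dict_subset : List (String × List Int)) (out : List (List String × List Int)) : Prop := out = compute_all_combinations_intersections_alt idx_dict_subset
instance (idx_dict_subset : List (String × List Int)) (out : List (List String × List Int)) : Decidable (Spec_compute_all_combinations_intersections idx_dict_subset out) := by unfold Spec_compute_all_combinations_intersections; infer_instance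

-- ===== CLAIM (what is proved, stated in full; the proofs are below) =====
def Claim_equal_compute_all_combinations_intersections : Prop := ∀ (idx_dict_subset : List (String × List Int)), Dom_compute_all_combinations_intersections idx_dict_subset → Spec_compute_all_combinations_intersections idx_dict_subset (compute_all_combinations_intersections idx_dict_subset)

-- ===== LEMMAS AND PROOFS =====

-- the dict of per-layer sets that B precomputes, as a value-map over A's dict
def pvMapVals (d : PySem.Dict String (List Int)) : PySem.Dict String (List Int) :=
  PySem.Dict.mk (d.items.map (fun p => (p.1, PySem.Set.ofList p.2)))

theorem pv_get?_mapVals (d : PySem.Dict String (List Int)) (x : String) :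
    (pvMapVals d).get? x = (d.get? x).map PySem.Set.ofList := by
  simp only [PySem.Dict.get?, pvMapVals, List.find?_map]
  rw [show ((fun p : String × List Int => p.1 == x) ∘ fun p : String × List Int =>
      (p.1, PySem.Set.ofList p.2)) = (fun p : String × List Int => p.1 == x) from rfl]
  cases List.find? (fun p : String × List Int => p.1 == x) d.items with
  | none => rfl
  | some p => rfl

theorem pv_contains_mapVals (d : PySem.Dict String (List Int)) (k : String) :
    (pvMapVals d).contains k = d.contains k := by
  rw [PySem.Dict.contains_eq_isSome_get?, PySem.Dict.contains_eq_isSome_get?, pv_get?_mapVals]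
  cases d.get? k with
  | none => rfl
  | some v => rfl

theorem pv_insert_mapVals (d : PySem.Dict String (List Int)) (k : String) (v : List Int) :
    (pvMapVals d).insert k (PySem.Set.ofList v) = pvMapVals (d.insert k v) := by
  by_cases h : d.contains k = true
  · simp only [PySem.Dict.insert, pv_contains_mapVals, h, if_pos]
    simp only [pvMapVals, List.map_map]
    congr 1
    apply List.map_congr_left
    intro p _
    by_cases hk : p.1 = k <;> simp [hk]
  · simp only [PySem.Dict.insert, pv_contains_mapVals, if_neg h]
    simp [pvMapVals]

theorem pv_layer_sets_eq (l : List (String × List Int)) (d : PySem.Dict String (List Int)) :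
    l.foldl (fun d p => d.insert p.1 (PySem.Set.ofList p.2)) (pvMapVals d)
      = pvMapVals (l.foldl (fun d p => d.insert p.1 p.2) d) := by
  induction l generalizing d with
  | nil => rfl
  | cons p l ih =>
      simp only [List.foldl_cons]
      rw [pv_insert_mapVals, ih]

theorem pv_keys_mapVals (d : PySem.Dict String (List Int)) :
    (pvMapVals d).keys = d.keys := by
  simp [pvMapVals, PySem.Dict.keys, List.map_map, Function.comp]

theorem pv_getD_mapVals (d : PySem.Dict String (List Int)) (x : String) :
    (pvMapVals d).getD x [] = PySem.Set.ofList (d.getD x []) := by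
  simp only [PySem.Dict.getD, pv_get?_mapVals]
  cases d.get? x with
  | none => rfl
  | some v => rfl

-- combinations of a duplicate-free list are pairwise distinct
theorem pv_nodup_combinations (xs : List String) (r : Nat) (h : xs.Nodup) :
    (PySem.List.combinations xs r).Nodup := by
  induction xs generalizing r with
  | nil =>
      cases r with
      | zero => simp [PySem.List.combinations_zero]
      | succ r => simp [PySem.List.combinations_nil_succ]
  | cons x xs ih =>
      cases r with
      | zero => simp [PySem.List.combinations_zero]
      | succ r =>
          rw [PySem.List.combinations_cons_succ]
          have hx : x ∉ xs := (List.nodup_cons.mp h).1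
          have hxs : xs.Nodup := (List.nodup_cons.mp h).2
          apply List.Nodup.append
          · exact List.Nodup.map (fun a b hab => by simpa using hab) (ih r hxs)
          · exact ih (r+1) hxs
          · intro c hc1 hc2
            obtain ⟨c', _, rfl⟩ := List.mem_map.mp hc1
            have hsub : (x :: c').Sublist xs := (PySem.List.mem_combinations_iff _ _ _).mp hc2 |>.1
            exact hx (hsub.subset (List.mem_cons_self))

-- the flattened list of all combinations (sizes 2 … n) has no repeats
theorem pv_nodup_big (layers : List String) (h : layers.Nodup) (n : Int) :
    ((PySem.List.pyRange 2 n 1).flatMap (fun r => PySem.List.combinations layers r.toNat)).Nodup := by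
  rw [List.nodup_flatMap]
  constructor
  · intro r _
    exact pv_nodup_combinations layers r.toNat h
  · have hp := PySem.List.pairwise_lt_pyRange_one 2 n
    refine List.Pairwise.imp_of_mem ?_ hp
    intro r s hr hs hlt c hc1 hc2
    have h2r : 2 ≤ r := (PySem.List.mem_pyRange_one.mp hr).1
    have l1 := PySem.List.length_of_mem_combinations hc1
    have l2 := PySem.List.length_of_mem_combinations hc2
    have : r.toNat = s.toNat := l1 ▸ l2 ▸ rfl
    omega

-- ghost structures: combinations paired with the suffix of xs after their last element
def pvCwt : List String → Nat → List (List String × List String)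
  | xs, 0 => [([], xs)]
  | [], _+1 => []
  | x :: xs, r+1 => (pvCwt xs r).map (fun p => (x :: p.1, p.2)) ++ pvCwt xs (r+1)

def pvSplits : List String → List (String × List String)
  | [] => []
  | x :: xs => (x, xs) :: pvSplits xs

-- A's value at a combination
def pvValue (d : PySem.Dict String (List Int)) (c : List String) : List Int :=
  pyIntersectAll (c.map (fun layer => PySem.Set.ofList (d.getD layer [])))

-- a pvCwt level decorated with A's values
def pvDec (d : PySem.Dict String (List Int)) (l : List (List String × List String)) :
    List (List String × List String × List Int) :=
  l.map (fun p => (p.1, p.2, pvValue d p.1))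

theorem pyIntersectAll_append (ss : List (List Int)) (t : List Int) (h : ss ≠ []) :
    pyIntersectAll (ss ++ [t]) = PySem.Set.inter (pyIntersectAll ss) t := by
  cases ss with
  | nil => exact absurd rfl h
  | cons s rest =>
      show ((rest ++ [t]).foldl PySem.Set.inter s) = _
      rw [List.foldl_append]
      rfl

theorem pvValue_append (d : PySem.Dict String (List Int)) (c : List String) (x : String)
    (h : c ≠ []) :
    pvValue d (c ++ [x]) = PySem.Set.inter (pvValue d c) (PySem.Set.ofList (d.getD x [])) := by
  unfold pvValue
  rw [List.map_append, List.map_singleton, pyIntersectAll_append]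
  intro hc
  exact h (by simpa using congrArg List.length hc)

-- the first components of a pvCwt level are exactly the combinations, in order
theorem pv_cwt_fst (xs : List String) (r : Nat) :
    (pvCwt xs r).map Prod.fst = PySem.List.combinations xs r := by
  induction xs generalizing r with
  | nil =>
      cases r with
      | zero => simp [pvCwt, PySem.List.combinations_zero]
      | succ r => simp [pvCwt, PySem.List.combinations_nil_succ]
  | cons x xs ih =>
      cases r with
      | zero => simp [pvCwt, PySem.List.combinations_zero]
      | succ r =>
          show ((pvCwt xs r).map _ ++ pvCwt xs (r+1)).map Prod.fst = _
          rw [List.map_append, List.map_map, PySem.List.combinations_cons_succ, ← ih r, ← ih (r+1),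
            List.map_map]
          rfl

theorem pv_cwt_fst_ne_nil (xs : List String) (r : Nat) (p : List String × List String)
    (hp : p ∈ pvCwt xs (r + 1)) : p.1 ≠ [] := by
  have h1 : p.1 ∈ (pvCwt xs (r+1)).map Prod.fst := List.mem_map_of_mem hp
  rw [pv_cwt_fst] at h1
  have := PySem.List.length_of_mem_combinations h1
  intro hc
  simp [hc] at this

theorem pv_splits_one (xs : List String) :
    (pvSplits xs).map (fun q => ([q.1], q.2)) = pvCwt xs 1 := by
  induction xs with
  | nil => rfl
  | cons x xs ih => simp [pvSplits, pvCwt, ih]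

-- one combinatorial extension step: every (r+1)-combination extended by each later element
-- gives the (r+2)-combinations, in order
theorem pv_cwt_step (xs : List String) (r : Nat) :
    (pvCwt xs (r + 1)).flatMap
        (fun p => (pvSplits p.2).map (fun q => (p.1 ++ [q.1], q.2)))
      = pvCwt xs (r + 2) := by
  induction xs generalizing r with
  | nil => rfl
  | cons x xs ih =>
      show ((pvCwt xs r).map _ ++ pvCwt xs (r+1)).flatMap _ = _
      rw [List.flatMap_append]
      have h2 : (pvCwt xs (r+1)).flatMap
          (fun p => (pvSplits p.2).map (fun q => (p.1 ++ [q.1], q.2))) = pvCwt xs (r+2) := ih r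
      have h1 : ((pvCwt xs r).map (fun p => (x :: p.1, p.2))).flatMap
          (fun p => (pvSplits p.2).map (fun q => (p.1 ++ [q.1], q.2)))
          = (pvCwt xs (r+1)).map (fun p => (x :: p.1, p.2)) := by
        rw [List.flatMap_map]
        have hpt : (pvCwt xs r).flatMap
            (fun a => (fun p => (pvSplits p.2).map (fun q => (p.1 ++ [q.1], q.2)))
              ((fun p : List String × List String => (x :: p.1, p.2)) a))
            = (pvCwt xs r).flatMap
              (fun a => ((pvSplits a.2).map (fun q => (a.1 ++ [q.1], q.2))).map
                (fun p : List String × List String => (x :: p.1, p.2))) := by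
          apply List.flatMap_congr
          intro p _
          simp [List.map_map]
        rw [hpt, ← List.map_flatMap]
        cases r with
        | zero =>
            have hz : (pvCwt xs 0).flatMap
                (fun a => (pvSplits a.2).map (fun q => (a.1 ++ [q.1], q.2)))
                = pvCwt xs 1 := by
              rw [show pvCwt xs 0 = [([], xs)] by simp [pvCwt]]
              show (pvSplits xs).map (fun q => ([] ++ [q.1], q.2)) ++ [] = _
              rw [List.append_nil,
                show (fun q : String × List String => ([] ++ [q.1], q.2))
                  = (fun q : String × List String => ([q.1], q.2)) from rfl,
                pv_splits_one]
            rw [hz]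
        | succ r' => rw [ih r']
      rw [h1, h2]
      rfl

-- the spread loop, started from a combination's stored intersection, produces the decorated
-- extensions of that combination
theorem pv_spread_spec (d : PySem.Dict String (List Int)) (t : List String) (c : List String)
    (hc : c ≠ []) :
    pvSpread (pvMapVals d) c (pvValue d c) t
      = (pvSplits t).map (fun q => (c ++ [q.1], q.2, pvValue d (c ++ [q.1]))) := by
  induction t with
  | nil => rfl
  | cons x t ih =>
      show (c ++ [x], t, PySem.Set.inter (pvValue d c) ((pvMapVals d).getD x [])) :: _ = _
      rw [pv_getD_mapVals, ← pvValue_append d c x hc, ih]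
      rfl

-- one DP level: spreading a decorated level gives the next decorated level
theorem pv_level_step (d : PySem.Dict String (List Int)) (xs : List String) (r : Nat) :
    (pvDec d (pvCwt xs (r + 1))).flatMap (fun p => pvSpread (pvMapVals d) p.1 p.2.2 p.2.1)
      = pvDec d (pvCwt xs (r + 2)) := by
  unfold pvDec
  rw [List.flatMap_map, ← pv_cwt_step xs r, List.map_flatMap]
  apply List.flatMap_congr
  intro p hp
  show pvSpread (pvMapVals d) p.1 (pvValue d p.1) p.2 = _
  rw [pv_spread_spec d p.2 p.1 (pv_cwt_fst_ne_nil xs r p hp), List.map_map]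
  rfl

theorem pv_init_spec (d : PySem.Dict String (List Int)) (xs : List String) :
    pvInitLevel (pvMapVals d) xs = pvDec d (pvCwt xs 1) := by
  induction xs with
  | nil => rfl
  | cons x xs ih =>
      show ([x], xs, (pvMapVals d).getD x []) :: pvInitLevel (pvMapVals d) xs = _
      rw [pv_getD_mapVals, ih, show pvCwt (x :: xs) 1 = ([x], xs) :: pvCwt xs 1 by simp [pvCwt]]
      rfl

-- the fold of B's main loop, level by level (the loop variable is unused by the body)
theorem pv_fold_spec (d : PySem.Dict String (List Int)) (layers : List String)
    (rs : List Int) (j : Nat) (acc : List (List String × List Int)) :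
    rs.foldl
        (fun (st : List (List String × List String × List Int) × List (List String × List Int)) _r =>
          let cur := st.1.flatMap (fun p => pvSpread (pvMapVals d) p.1 p.2.2 p.2.1)
          (cur, st.2 ++ cur.map (fun p => (p.1, p.2.2))))
        (pvDec d (pvCwt layers (j + 1)), acc)
      = (pvDec d (pvCwt layers (j + 1 + rs.length)),
          acc ++ (List.range rs.length).flatMap
            (fun i => (pvDec d (pvCwt layers (j + 2 + i))).map (fun p => (p.1, p.2.2)))) := by
  induction rs generalizing j acc with
  | nil => simp
  | cons r rs ih =>
      rw [List.foldl_cons]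
      show rs.foldl _ ((pvDec d (pvCwt layers (j+1))).flatMap _,
          acc ++ ((pvDec d (pvCwt layers (j+1))).flatMap _).map _) = _
      rw [pv_level_step d layers j]
      rw [show (j + 2 : Nat) = (j + 1) + 1 from rfl, ih (j+1)]
      refine congrArg₂ Prod.mk ?_ ?_
      · have e1 : j + 1 + 1 + rs.length = j + 1 + (r :: rs).length := by
          simp only [List.length_cons]
          omega
        rw [e1]
      · rw [List.append_assoc]
        congr 1
        show _ = List.flatMap _ (List.range (rs.length + 1))
        rw [List.range_succ_eq_map, List.flatMap_cons, List.flatMap_map]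
        refine congrArg₂ (· ++ ·) rfl ?_
        apply List.flatMap_congr
        intro i _
        show (pvDec d (pvCwt layers (j + 1 + 2 + i))).map (fun p => (p.1, p.2.2))
          = (pvDec d (pvCwt layers (j + 2 + (i + 1)))).map (fun p => (p.1, p.2.2))
        have e2 : j + 1 + 2 + i = j + 2 + (i + 1) := by omega
        rw [e2]

-- a decorated level, stripped to (combination, value) pairs
theorem pv_level_pairs (d : PySem.Dict String (List Int)) (layers : List String) (m : Nat) :
    (pvDec d (pvCwt layers m)).map (fun p => (p.1, p.2.2))
      = (PySem.List.combinations layers m).map (fun c => (c, pvValue d c)) := by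
  unfold pvDec
  rw [List.map_map, ← pv_cwt_fst layers m, List.map_map]
  rfl

-- range(2, n+1) explicitly
theorem pv_pyRange_two (n : Nat) :
    PySem.List.pyRange 2 ((n : Int) + 1) 1
      = (List.range (n - 1)).map (fun (i : Nat) => (i : Int) + 2) := by
  cases n with
  | zero => rfl
  | succ m =>
      induction m with
      | zero => rfl
      | succ k ihk =>
          have hb : ((k + 1 + 1 : Nat) : Int) + 1 = (((k + 1 : Nat) : Int) + 1) + 1 := by
            push_cast
            ring
          rw [hb, PySem.List.pyRange_one_succ_right (by push_cast; omega), ihk]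
          rw [show (k + 1 + 1 - 1 : Nat) = k + 1 from rfl, show (k + 1 - 1 : Nat) = k from rfl,
            List.range_succ, List.map_append]
          congr 1

-- the two nested loops, over any dict with duplicate-free keys, produce the same items list
theorem pv_main (d : PySem.Dict String (List Int)) (h : d.keys.Nodup) :
    ((PySem.List.pyRange 2 ((d.keys.length : Int) + 1) 1).foldl (fun dd r =>
        (PySem.List.combinations d.keys r.toNat).foldl (fun dd c =>
          dd.insert c (pyIntersectAll (c.map (fun layer => PySem.Set.ofList (d.getD layer []))))) dd)
      PySem.Dict.empty).items
    = (PySem.Dict.ofList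
        ((PySem.List.pyRange 2 ((d.keys.length : Int) + 1) 1).foldl
          (fun (st : List (List String × List String × List Int) × List (List String × List Int)) _r =>
            let cur := st.1.flatMap (fun p => pvSpread (pvMapVals d) p.1 p.2.2 p.2.1)
            (cur, st.2 ++ cur.map (fun p => (p.1, p.2.2))))
          (pvInitLevel (pvMapVals d) d.keys, [])).2).items := by
  set layers := d.keys with hl
  set R := PySem.List.pyRange 2 ((layers.length : Int) + 1) 1 with hR
  set big := R.flatMap (fun r => PySem.List.combinations layers r.toNat) with hbig
  have hbignd : big.Nodup := pv_nodup_big layers h _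
  -- A side: nested folds = one fold over the flattened combination list = its pair list
  have hA : (R.foldl (fun dd r =>
        (PySem.List.combinations layers r.toNat).foldl (fun dd c =>
          dd.insert c (pvValue d c)) dd) PySem.Dict.empty).items
      = big.map (fun c => (c, pvValue d c)) := by
    rw [hbig, ← List.foldl_flatMap]
    have := PySem.Dict.items_foldl_insert_fresh big (fun c => c) (fun c => pvValue d c)
      PySem.Dict.empty (fun a _ => PySem.Dict.contains_empty a) (by simpa using hbignd)
    simpa using this
  have hRlen : R.length = layers.length - 1 := by
    rw [hR, pv_pyRange_two]
    simp
  -- the pair list, indexed by level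
  have hAside : big.map (fun c => (c, pvValue d c))
      = (List.range (layers.length - 1)).flatMap
          (fun i => (PySem.List.combinations layers (i + 2)).map (fun c => (c, pvValue d c))) := by
    rw [hbig, List.map_flatMap, hR, pv_pyRange_two, List.flatMap_map]
    apply List.flatMap_congr
    intro i _
    show (PySem.List.combinations layers ((i : Int) + 2).toNat).map (fun c => (c, pvValue d c))
      = (PySem.List.combinations layers (i + 2)).map (fun c => (c, pvValue d c))
    have e : ((i : Int) + 2).toNat = i + 2 := by omega
    rw [e]
  -- B side: the DP levels flatten to the same indexed pair list
  have hBside : (R.foldl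
      (fun (st : List (List String × List String × List Int) × List (List String × List Int)) _r =>
        let cur := st.1.flatMap (fun p => pvSpread (pvMapVals d) p.1 p.2.2 p.2.1)
        (cur, st.2 ++ cur.map (fun p => (p.1, p.2.2))))
      (pvInitLevel (pvMapVals d) layers, [])).2
      = (List.range (layers.length - 1)).flatMap
          (fun i => (PySem.List.combinations layers (i + 2)).map (fun c => (c, pvValue d c))) := by
    rw [pv_init_spec d layers,
      show pvDec d (pvCwt layers 1) = pvDec d (pvCwt layers (0 + 1)) from rfl,
      pv_fold_spec d layers R 0 []]
    show ([] : List (List String × List Int)) ++ _ = _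
    rw [List.nil_append, hRlen]
    apply List.flatMap_congr
    intro i _
    rw [pv_level_pairs d layers]
    have e : (0 + 2 + i : Nat) = i + 2 := by omega
    rw [e]
  -- dict(pairs) keeps the fresh-keyed pairs as items
  have hfst : ((big.map (fun c => (c, pvValue d c))).map Prod.fst).Nodup := by
    rw [List.map_map,
      show (Prod.fst ∘ (fun c => (c, pvValue d c))) = (fun c : List String => c) from rfl]
    simpa using hbignd
  have hB : (PySem.Dict.ofList ((R.foldl
      (fun (st : List (List String × List String × List Int) × List (List String × List Int)) _r =>
        let cur := st.1.flatMap (fun p => pvSpread (pvMapVals d) p.1 p.2.2 p.2.1)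
        (cur, st.2 ++ cur.map (fun p => (p.1, p.2.2))))
      (pvInitLevel (pvMapVals d) layers, [])).2)).items
      = big.map (fun c => (c, pvValue d c)) := by
    rw [hBside, ← hAside]
    have := PySem.Dict.items_foldl_insert_fresh (big.map (fun c => (c, pvValue d c)))
      Prod.fst Prod.snd PySem.Dict.empty (fun a _ => PySem.Dict.contains_empty a.1) hfst
    simp only [PySem.Dict.ofList, PySem.Dict.update]
    rw [this, List.map_map]
    show [] ++ List.map ((fun a : List String × List Int => (a.1, a.2)) ∘
      (fun c => (c, pvValue d c))) big = List.map (fun c => (c, pvValue d c)) big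
    rw [List.nil_append]
    apply List.map_congr_left
    intro c _
    rfl
  exact hA.trans hB.symm

-- ===== VERDICT (by name: the statement is the Claim_ definition above) =====
theorem compute_all_combinations_intersections_spec : Claim_equal_compute_all_combinations_intersections := by
  intro idx _
  show compute_all_combinations_intersections idx = compute_all_combinations_intersections_alt idx
  have hsets : idx.foldl (fun d p => d.insert p.1 (PySem.Set.ofList p.2)) PySem.Dict.empty
      = pvMapVals (PySem.Dict.ofList idx) := by
    simpa [PySem.Dict.ofList, PySem.Dict.update] using pv_layer_sets_eq idx PySem.Dict.empty
  unfold compute_all_combinations_intersections compute_all_combinations_intersections_alt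
  simp only [hsets, pv_keys_mapVals]
  exact pv_main (PySem.Dict.ofList idx) (PySem.Dict.nodup_keys_ofList idx)
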